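-- pv_equiv track=rewrite | github.com/soni-vikas/leetcode | 128-longest-consecutive-sequence.py | get_consecutive_element_len
-- ===== SOURCE A (Python) =====
-- def get_consecutive_element_len(i, nums_set):
--     count = 0
--     if i in nums_set:
--         k = i
--         while k in nums_set:
--             nums_set.remove(k)
--             count += 1
--             k -= 1
--
--         k = i + 1
--         while k in nums_set:
--             nums_set.remove(k)
--             count += 1
--             k += 1
--
--     return count
-- ===== SOURCE B (Python) =====
-- def _run_bounds(vals, i):
--     # vals sorted distinct; returns (lo, hi) of the first run containing i
--     start = vals[0]
--     prev = vals[0]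
--     for v in vals[1:]:
--         if v == prev + 1:
--             prev = v
--         else:
--             if start <= i <= prev:
--                 return (start, prev)
--             start = v
--             prev = v
--     return (start, prev)
--
-- def get_consecutive_element_len(i, nums_set):
--     if i not in nums_set:
--         return 0
--     lo, hi = _run_bounds(sorted(set(nums_set)), i)
--     for k in range(lo, hi + 1):
--         nums_set.remove(k)
--     return hi - lo + 1
-- ===== Notes on version B (the rewrite author's own statement) =====
-- stated objective: alternative
-- what changed: B sorts the distinct values once and scans the sorted list left-to-right run by run until it finds the run containing i (no membership walks around i), then removes that run and returns its closed-form length, instead of A's two interleaved remove-while-walking membership loops expanding from i.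
import Mathlib
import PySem

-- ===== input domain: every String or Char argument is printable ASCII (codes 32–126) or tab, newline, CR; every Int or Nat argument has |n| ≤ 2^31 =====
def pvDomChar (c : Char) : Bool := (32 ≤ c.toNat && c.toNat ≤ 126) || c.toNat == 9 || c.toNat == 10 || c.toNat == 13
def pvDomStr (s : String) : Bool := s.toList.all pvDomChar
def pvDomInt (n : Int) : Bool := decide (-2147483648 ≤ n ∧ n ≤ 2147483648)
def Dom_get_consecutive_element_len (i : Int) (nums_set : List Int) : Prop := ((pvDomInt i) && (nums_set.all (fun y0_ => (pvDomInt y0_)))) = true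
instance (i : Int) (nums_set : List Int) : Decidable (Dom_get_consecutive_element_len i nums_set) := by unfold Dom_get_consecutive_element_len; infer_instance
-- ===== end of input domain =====

-- B sorts the distinct values once and scans run by run for the run containing i, instead of
-- A's remove-while-walking membership loops; the equivalence proved is about the RETURN value
-- only (both Pythons remove the run's elements from nums_set in place, one occurrence each).

-- ===== PORT A =====
-- 'while k in nums_set: nums_set.remove(k); count += 1; k -= 1' (remove = erase one occurrence)
def pvADown (s : List Int) (k count : Int) : List Int × Int :=
  if h : k ∈ s then pvADown (s.erase k) (k - 1) (count + 1) else (s, count)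
termination_by s.length
decreasing_by
  have := List.length_erase_of_mem h
  have : 0 < s.length := List.length_pos_of_mem h
  omega

-- 'while k in nums_set: nums_set.remove(k); count += 1; k += 1'
def pvAUp (s : List Int) (k count : Int) : List Int × Int :=
  if h : k ∈ s then pvAUp (s.erase k) (k + 1) (count + 1) else (s, count)
termination_by s.length
decreasing_by
  have := List.length_erase_of_mem h
  have : 0 < s.length := List.length_pos_of_mem h
  omega

def get_consecutive_element_len (i : Int) (nums_set : List Int) : Int :=
  if i ∈ nums_set then
    let r := pvADown nums_set i 0
    (pvAUp r.1 (i + 1) r.2).2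
  else 0

-- ===== PORT B =====
-- Source B's _run_bounds: scan the sorted distinct values run by run; return the first run [start, prev]
-- that contains i (or the last run when the list is exhausted)
def pvRunBounds (i : Int) (start prev : Int) : List Int → Int × Int
  | [] => (start, prev)
  | v :: rest =>
    if v = prev + 1 then pvRunBounds i start v rest
    else if start ≤ i ∧ i ≤ prev then (start, prev)
    else pvRunBounds i v v rest

-- the removal pass of Source B cannot affect the return value and is not part of this port
-- 'lo, hi = _run_bounds(sorted(set(nums_set)), i); return hi - lo + 1'
def pvBLen (i : Int) : List Int → Int
  | [] => 0
  | v :: rest => (pvRunBounds i v v rest).2 - (pvRunBounds i v v rest).1 + 1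

def get_consecutive_element_len_alt (i : Int) (nums_set : List Int) : Int :=
  if i ∈ nums_set then
    pvBLen i (PySem.List.sorted (PySem.Set.ofList nums_set) (fun x => x) false)
  else 0

-- ===== PRECONDITION & SPEC =====
def Spec_get_consecutive_element_len (i : Int) (nums_set : List Int) (out : Int) : Prop := out = get_consecutive_element_len_alt i nums_set
instance (i : Int) (nums_set : List Int) (out : Int) : Decidable (Spec_get_consecutive_element_len i nums_set out) := by unfold Spec_get_consecutive_element_len; infer_instance

-- ===== CLAIM (what is proved, stated in full; the proofs are below) =====
def Claim_equal_get_consecutive_element_len : Prop := ∀ (i : Int) (nums_set : List Int), Dom_get_consecutive_element_len i nums_set → Spec_get_consecutive_element_len i nums_set (get_consecutive_element_len i nums_set)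

-- ===== LEMMAS AND PROOFS =====

-- proof-side helpers: the characterisation of both results is the lower/upper membership walk
theorem pvFilterLenLt {s : List Int} {p q : Int → Bool} {x : Int}
    (hx : x ∈ s) (hq : q x = true) (hp : p x = false)
    (himp : ∀ y, p y = true → q y = true) :
    (s.filter p).length < (s.filter q).length := by
  induction s with
  | nil => cases hx
  | cons a t ih =>
    rcases List.mem_cons.mp hx with rfl | ha
    · simp [List.filter, hp, hq]
      have : (t.filter p).length ≤ (t.filter q).length := by
        apply List.Sublist.length_le
        exact List.monotone_filter_right t (by intro y hy; exact himp y hy)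
      omega
    · by_cases hpa : p a = true
      · simp [List.filter, hpa, himp a hpa]
        exact ih ha
      · simp [List.filter, hpa]
        have h1 := ih ha
        by_cases hqa : q a = true <;> simp [hqa] <;> omega

def pvBLo (s : List Int) (lo : Int) : Int :=
  if h : (lo - 1) ∈ s then pvBLo s (lo - 1) else lo
termination_by (s.filter (fun m => decide (m < lo))).length
decreasing_by
  exact pvFilterLenLt h (by simp) (by simp)
    (by intro y hy; simp at hy ⊢; omega)

def pvBHi (s : List Int) (hi : Int) : Int :=
  if h : (hi + 1) ∈ s then pvBHi s (hi + 1) else hi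
termination_by (s.filter (fun m => decide (hi < m))).length
decreasing_by
  exact pvFilterLenLt h (by simp) (by simp)
    (by intro y hy; simp at hy ⊢; omega)

-- membership-only congruence: pvBLo only looks at values below lo
theorem pvBLo_congr : ∀ (n : Nat) (s t : List Int) (lo : Int),
    (s.filter (fun m => decide (m < lo))).length ≤ n →
    (∀ m : Int, m < lo → (m ∈ s ↔ m ∈ t)) → pvBLo s lo = pvBLo t lo := by
  intro n
  induction n with
  | zero =>
    intro s t lo hn hmem
    conv_lhs => rw [pvBLo]
    conv_rhs => rw [pvBLo]
    by_cases h : (lo - 1) ∈ s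
    · exfalso
      have : 0 < (s.filter (fun m => decide (m < lo))).length := by
        have : (lo - 1) ∈ s.filter (fun m => decide (m < lo)) :=
          List.mem_filter.mpr ⟨h, by simp only [decide_eq_true_eq]; omega⟩
        exact List.length_pos_of_mem this
      omega
    · have h' : (lo - 1) ∉ t := fun ht => h (((hmem (lo - 1)) (by omega)).mpr ht)
      simp [h, h']
  | succ n ih =>
    intro s t lo hn hmem
    conv_lhs => rw [pvBLo]
    conv_rhs => rw [pvBLo]
    by_cases h : (lo - 1) ∈ s
    · have h' : (lo - 1) ∈ t := (hmem (lo - 1) (by omega)).mp h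
      simp only [h, h', dite_true]
      apply ih
      · have hlt : (s.filter (fun m => decide (m < lo - 1))).length <
            (s.filter (fun m => decide (m < lo))).length :=
          pvFilterLenLt h (by simp) (by simp) (by intro y hy; simp at hy ⊢; omega)
        omega
      · intro m hm; exact hmem m (by omega)
    · have h' : (lo - 1) ∉ t := fun ht => h ((hmem (lo - 1) (by omega)).mpr ht)
      simp [h, h']

-- membership-only congruence: pvBHi only looks at values above hi
theorem pvBHi_congr : ∀ (n : Nat) (s t : List Int) (hi : Int),
    (s.filter (fun m => decide (hi < m))).length ≤ n →
    (∀ m : Int, hi < m → (m ∈ s ↔ m ∈ t)) → pvBHi s hi = pvBHi t hi := by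
  intro n
  induction n with
  | zero =>
    intro s t hi hn hmem
    conv_lhs => rw [pvBHi]
    conv_rhs => rw [pvBHi]
    by_cases h : (hi + 1) ∈ s
    · exfalso
      have : 0 < (s.filter (fun m => decide (hi < m))).length := by
        have : (hi + 1) ∈ s.filter (fun m => decide (hi < m)) :=
          List.mem_filter.mpr ⟨h, by simp only [decide_eq_true_eq]; omega⟩
        exact List.length_pos_of_mem this
      omega
    · have h' : (hi + 1) ∉ t := fun ht => h ((hmem (hi + 1) (by omega)).mpr ht)
      simp [h, h']
  | succ n ih =>
    intro s t hi hn hmem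
    conv_lhs => rw [pvBHi]
    conv_rhs => rw [pvBHi]
    by_cases h : (hi + 1) ∈ s
    · have h' : (hi + 1) ∈ t := (hmem (hi + 1) (by omega)).mp h
      simp only [h, h', dite_true]
      apply ih
      · have hlt : (s.filter (fun m => decide (hi + 1 < m))).length <
            (s.filter (fun m => decide (hi < m))).length :=
          pvFilterLenLt h (by simp) (by simp) (by intro y hy; simp at hy ⊢; omega)
        omega
      · intro m hm; exact hmem m (by omega)
    · have h' : (hi + 1) ∉ t := fun ht => h ((hmem (hi + 1) (by omega)).mpr ht)
      simp [h, h']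

-- A's downward loop counts exactly the walk pvBLo performs
theorem pvADown_snd : ∀ (n : Nat) (s : List Int) (k c : Int), s.length ≤ n →
    (pvADown s k c).2 = c + (k + 1 - pvBLo s (k + 1)) := by
  intro n
  induction n with
  | zero =>
    intro s k c hn
    have hs : s = [] := List.eq_nil_of_length_eq_zero (by omega)
    subst hs
    rw [pvADown, pvBLo]
    simp
  | succ n ih =>
    intro s k c hn
    rw [pvADown]
    by_cases h : k ∈ s
    · simp only [h, dite_true]
      have hlen : (s.erase k).length ≤ n := by
        have := List.length_erase_of_mem h
        have := List.length_pos_of_mem h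
        omega
      rw [ih (s.erase k) (k - 1) (c + 1) hlen]
      have h1 : k - 1 + 1 = k := by omega
      rw [h1]
      have hcongr : pvBLo (s.erase k) k = pvBLo s k := by
        apply pvBLo_congr (s.filter (fun m => decide (m < k))).length _ _ k
        · apply List.Sublist.length_le
          exact List.Sublist.filter _ (List.erase_sublist)
        · intro m hm
          exact List.mem_erase_of_ne (by omega)
      have hstep : pvBLo s (k + 1) = pvBLo s k := by
        rw [pvBLo]; simp [h]
      rw [hcongr, hstep]
      omega
    · simp only [h, dite_false]
      rw [pvBLo]
      have h2 : k + 1 - 1 = k := by omega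
      rw [h2]
      simp only [h, dite_false]
      omega

-- A's downward loop removes only values ≤ its start
theorem pvADown_fst_mem : ∀ (n : Nat) (s : List Int) (k c m : Int), s.length ≤ n →
    k < m → ((m ∈ (pvADown s k c).1) ↔ m ∈ s) := by
  intro n
  induction n with
  | zero =>
    intro s k c m hn hk
    have hs : s = [] := List.eq_nil_of_length_eq_zero (by omega)
    subst hs
    rw [pvADown]; simp
  | succ n ih =>
    intro s k c m hn hk
    rw [pvADown]
    by_cases h : k ∈ s
    · simp only [h, dite_true]
      have hlen : (s.erase k).length ≤ n := by
        have := List.length_erase_of_mem h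
        have := List.length_pos_of_mem h
        omega
      rw [ih (s.erase k) (k - 1) (c + 1) m hlen (by omega)]
      exact List.mem_erase_of_ne (by omega)
    · simp [h]

-- A's upward loop counts exactly the walk pvBHi performs
theorem pvAUp_snd : ∀ (n : Nat) (s : List Int) (k c : Int), s.length ≤ n →
    (pvAUp s k c).2 = c + (pvBHi s (k - 1) + 1 - k) := by
  intro n
  induction n with
  | zero =>
    intro s k c hn
    have hs : s = [] := List.eq_nil_of_length_eq_zero (by omega)
    subst hs
    rw [pvAUp, pvBHi]
    simp
  | succ n ih =>
    intro s k c hn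
    rw [pvAUp]
    by_cases h : k ∈ s
    · simp only [h, dite_true]
      have hlen : (s.erase k).length ≤ n := by
        have := List.length_erase_of_mem h
        have := List.length_pos_of_mem h
        omega
      rw [ih (s.erase k) (k + 1) (c + 1) hlen]
      have h1 : k + 1 - 1 = k := by omega
      rw [h1]
      have hcongr : pvBHi (s.erase k) k = pvBHi s k := by
        apply pvBHi_congr (s.filter (fun m => decide (k < m))).length _ _ k
        · apply List.Sublist.length_le
          exact List.Sublist.filter _ (List.erase_sublist)
        · intro m hm
          exact List.mem_erase_of_ne (by omega)
      have hstep : pvBHi s (k - 1) = pvBHi s k := by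
        rw [pvBHi]; simp [h]
      rw [hcongr, hstep]
      omega
    · simp only [h, dite_false]
      rw [pvBHi]
      have h2 : k - 1 + 1 = k := by omega
      rw [h2]
      simp only [h, dite_false]
      omega

-- the walk pvBLo stops exactly at the left end of a consecutive block contained in s
theorem pvBLo_eq : ∀ (n : Nat) (s : List Int) (start i : Int), (i - start).toNat ≤ n →
    start ≤ i → (∀ k : Int, start ≤ k → k ≤ i → k ∈ s) → (start - 1) ∉ s →
    pvBLo s i = start := by
  intro n
  induction n with
  | zero =>
    intro s start i hn hsi hin hout
    have : i = start := by omega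
    subst this
    rw [pvBLo]
    simp [hout]
  | succ n ih =>
    intro s start i hn hsi hin hout
    rw [pvBLo]
    by_cases h : (i - 1) ∈ s
    · simp only [h, dite_true]
      have hne : i ≠ start := by
        intro he; subst he; exact hout (by simpa using h)
      exact ih s start (i - 1) (by omega) (by omega)
        (fun k hk1 hk2 => hin k hk1 (by omega)) hout
    · simp only [h, dite_false]
      by_contra hne
      exact h (hin (i - 1) (by omega) (by omega))

-- the walk pvBHi stops exactly at the right end of a consecutive block contained in s
theorem pvBHi_eq : ∀ (n : Nat) (s : List Int) (i prev : Int), (prev - i).toNat ≤ n →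
    i ≤ prev → (∀ k : Int, i ≤ k → k ≤ prev → k ∈ s) → (prev + 1) ∉ s →
    pvBHi s i = prev := by
  intro n
  induction n with
  | zero =>
    intro s i prev hn hip hin hout
    have : i = prev := by omega
    subst this
    rw [pvBHi]
    simp [hout]
  | succ n ih =>
    intro s i prev hn hip hin hout
    rw [pvBHi]
    by_cases h : (i + 1) ∈ s
    · simp only [h, dite_true]
      have hne : i ≠ prev := by
        intro he; subst he; exact hout (by simpa using h)
      exact ih s (i + 1) prev (by omega) (by omega)
        (fun k hk1 hk2 => hin k (by omega) hk2) hout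
    · simp only [h, dite_false]
      by_contra hne
      exact h (hin (i + 1) (by omega) (by omega))

-- B's run scan over the sorted distinct values finds exactly the walks' bounds
theorem pvRunBounds_eq (i : Int) (s : List Int) :
    ∀ (rest : List Int) (start prev : Int),
    start ≤ prev →
    (prev :: rest).Pairwise (· < ·) →
    (∀ m : Int, prev < m → (m ∈ s ↔ m ∈ rest)) →
    (∀ k : Int, start ≤ k → k ≤ prev → k ∈ s) →
    (start - 1) ∉ s →
    ((start ≤ i ∧ i ≤ prev) ∨ (prev < i ∧ i ∈ rest)) →
    pvRunBounds i start prev rest = (pvBLo s i, pvBHi s i) := by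
  intro rest
  induction rest with
  | nil =>
    intro start prev _ _ hmem hin hout hi
    rcases hi with ⟨h1, h2⟩ | ⟨_, hmem2⟩
    · rw [pvRunBounds]
      have hlo := pvBLo_eq (i - start).toNat s start i (le_refl _) h1
        (fun k hk1 hk2 => hin k hk1 (by omega)) hout
      have hhi := pvBHi_eq (prev - i).toNat s i prev (le_refl _) h2
        (fun k hk1 hk2 => hin k (by omega) hk2)
        (fun hc => by simpa using (hmem (prev + 1) (by omega)).mp hc)
      rw [hlo, hhi]
    · cases hmem2
  | cons v rs ih =>
    intro start prev hsp hpair hmem hin hout hi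
    have hpv : prev < v := (List.pairwise_cons.mp hpair).1 v (List.mem_cons_self ..)
    have hvrs : ∀ x ∈ rs, v < x :=
      (List.pairwise_cons.mp (List.pairwise_cons.mp hpair).2).1
    have hpairv : (v :: rs).Pairwise (· < ·) := (List.pairwise_cons.mp hpair).2
    have hvs : v ∈ s := (hmem v hpv).mpr (List.mem_cons_self ..)
    rw [pvRunBounds]
    by_cases hv : v = prev + 1
    · simp only [hv, if_true]
      apply ih start (prev + 1) (by omega)
      · rwa [hv] at hpairv
      · intro m hm
        rw [hmem m (by omega)]
        constructor
        · intro hc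
          rcases List.mem_cons.mp hc with rfl | h2
          · omega
          · exact h2
        · intro hc; exact List.mem_cons.mpr (Or.inr hc)
      · intro k hk1 hk2
        by_cases hk : k ≤ prev
        · exact hin k hk1 hk
        · have : k = prev + 1 := by omega
          subst this; rwa [← hv]
      · exact hout
      · rcases hi with ⟨h1, h2⟩ | ⟨h1, h2⟩
        · exact Or.inl ⟨h1, by omega⟩
        · rcases List.mem_cons.mp h2 with rfl | h3
          · exact Or.inl ⟨by omega, by omega⟩
          · exact Or.inr ⟨by have := hvrs i h3; omega, h3⟩
    · have hvgt : prev + 1 < v := by omega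
      simp only [hv, if_false]
      by_cases hi2 : start ≤ i ∧ i ≤ prev
      · rw [if_pos hi2]
        have hlo := pvBLo_eq (i - start).toNat s start i (le_refl _) hi2.1
          (fun k hk1 hk2 => hin k hk1 (by omega)) hout
        have hp1 : (prev + 1) ∉ s := by
          intro hc
          rcases List.mem_cons.mp ((hmem (prev + 1) (by omega)).mp hc) with he | h2
          · omega
          · have := hvrs _ h2; omega
        have hhi := pvBHi_eq (prev - i).toNat s i prev (le_refl _) hi2.2
          (fun k hk1 hk2 => hin k (by omega) hk2) hp1
        rw [hlo, hhi]
      · simp only [hi2, if_false]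
        have hi3 : prev < i ∧ i ∈ v :: rs := by
          rcases hi with h | h
          · exact absurd h hi2
          · exact h
        apply ih v v (le_refl _) hpairv
        · intro m hm
          rw [hmem m (by omega)]
          constructor
          · intro hc
            rcases List.mem_cons.mp hc with rfl | h2
            · omega
            · exact h2
          · intro hc; exact List.mem_cons.mpr (Or.inr hc)
        · intro k hk1 hk2
          have : k = v := by omega
          subst this; exact hvs
        · intro hc
          rcases List.mem_cons.mp ((hmem (v - 1) (by omega)).mp hc) with he | h2
          · omega
          · have := hvrs _ h2; omega
        · rcases List.mem_cons.mp hi3.2 with rfl | h3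
          · exact Or.inl ⟨le_refl _, le_refl _⟩
          · exact Or.inr ⟨hvrs i h3, h3⟩

-- ===== VERDICT (by name: the statement is the Claim_ definition above) =====
theorem get_consecutive_element_len_spec : Claim_equal_get_consecutive_element_len := by
  intro i s _
  unfold Spec_get_consecutive_element_len get_consecutive_element_len get_consecutive_element_len_alt
  by_cases h : i ∈ s
  · simp only [h, if_true]
    -- A's value is pvBHi s i - pvBLo s i + 1
    rw [pvAUp_snd (pvADown s i 0).1.length _ _ _ (le_refl _),
        pvADown_snd s.length s i 0 (le_refl _)]
    have h1 : i + 1 - 1 = i := by omega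
    rw [h1]
    have hhi : pvBHi (pvADown s i 0).1 i = pvBHi s i := by
      apply pvBHi_congr ((pvADown s i 0).1.filter (fun m => decide (i < m))).length _ _ i (le_refl _)
      intro m hm
      exact pvADown_fst_mem s.length s i 0 m (le_refl _) hm
    have hlo : pvBLo s (i + 1) = pvBLo s i := by
      rw [pvBLo]; simp [h]
    rw [hhi, hlo]
    -- B's value is the same via the sorted run scan
    have hmemv : ∀ m : Int, m ∈ PySem.List.sorted (PySem.Set.ofList s) (fun x => x) false ↔ m ∈ s := by
      intro m
      rw [PySem.List.mem_sorted, PySem.Set.mem_ofList]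
    cases hvals : PySem.List.sorted (PySem.Set.ofList s) (fun x => x) false with
    | nil =>
      exfalso
      have := (hmemv i).mpr h
      rw [hvals] at this
      cases this
    | cons v rest =>
      have hpair : (v :: rest).Pairwise (· < ·) := by
        have := PySem.List.sorted_ofList_pairwise_lt (xs := s)
        rwa [hvals] at this
      have hvrest : ∀ x ∈ rest, v < x := (List.pairwise_cons.mp hpair).1
      have hmem' : ∀ m : Int, m ∈ v :: rest ↔ m ∈ s := by
        intro m; rw [← hvals]; exact hmemv m
      have hrb := pvRunBounds_eq i s rest v v (le_refl _) hpair
        (by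
          intro m hm
          rw [← hmem' m]
          constructor
          · intro hc
            rcases List.mem_cons.mp hc with rfl | h2
            · omega
            · exact h2
          · intro hc; exact List.mem_cons.mpr (Or.inr hc))
        (by
          intro k hk1 hk2
          have hkv : k = v := by omega
          rw [hkv]
          exact (hmem' v).mp (List.mem_cons_self ..))
        (by
          intro hc
          rcases List.mem_cons.mp ((hmem' (v - 1)).mpr hc) with he | h2
          · omega
          · have := hvrest _ h2; omega)
        (by
          rcases List.mem_cons.mp ((hmem' i).mpr h) with rfl | h3
          · exact Or.inl ⟨le_refl _, le_refl _⟩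
          · exact Or.inr ⟨hvrest i h3, h3⟩)
      rw [pvBLen, hrb]
      omega
  · simp [h]
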